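-- pv_equiv track=rewrite | github.com/yashFrost97/predictive-analytics | Predictive_analytics.py | count
-- ===== SOURCE A (Python) =====
-- def count(rows):
--
--     count = []
--     for row in rows:
--         if(row[-1] not in count):
--             count.append(row[-1])
--     if (len(count) == 1):
--         return True
--     else:
--         return False
-- ===== SOURCE B (Python) =====
-- def count(rows):
--     if not rows:
--         return False
--     ref = rows[0][-1]
--     return all(row[-1] == ref for row in rows)
-- ===== Notes on version B (the rewrite author's own statement) =====
-- stated objective: simpler
-- what changed: B keeps only the first row's last value as a reference and checks every row's last value equals it, instead of building a dedup list of distinct last values and testing its length.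
import Mathlib
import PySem

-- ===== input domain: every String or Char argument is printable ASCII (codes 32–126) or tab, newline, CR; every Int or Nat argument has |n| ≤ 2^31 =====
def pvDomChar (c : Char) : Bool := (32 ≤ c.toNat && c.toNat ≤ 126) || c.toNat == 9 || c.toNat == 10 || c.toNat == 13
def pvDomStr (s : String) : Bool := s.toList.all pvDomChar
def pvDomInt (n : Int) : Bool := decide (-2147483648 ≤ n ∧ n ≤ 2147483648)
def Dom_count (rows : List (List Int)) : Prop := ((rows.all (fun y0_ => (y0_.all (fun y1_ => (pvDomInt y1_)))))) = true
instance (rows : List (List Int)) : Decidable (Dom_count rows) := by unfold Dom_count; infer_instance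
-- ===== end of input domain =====

-- B differs from A only in decomposition: A collects the distinct last-column values and
-- tests whether exactly one was collected; B compares every last value to the first row's.

-- ===== PORT A =====
-- the loop body of A: 'if row[-1] not in count: count.append(row[-1])'
def pvStep (acc : List Int) (x : Int) : List Int := if x ∈ acc then acc else acc ++ [x]

-- A: build the list of distinct last-column values, then test its length.
def count (rows : List (List Int)) : Bool :=
  let c := rows.foldl (fun acc row => pvStep acc (PySem.List.pyGetD row (-1) 0)) []
  decide (c.length = 1)

-- ===== PORT B =====
-- B: empty → false; otherwise compare each row's last value with the first row's.
def count_alt (rows : List (List Int)) : Bool :=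
  match rows with
  | [] => false
  | r :: _ =>
    let ref := PySem.List.pyGetD r (-1) 0
    rows.all (fun row => PySem.List.pyGetD row (-1) 0 == ref)

-- ===== PRECONDITION & SPEC =====
-- Pre_ excludes rows containing an empty inner list: there row[-1] raises IndexError in both A and B.
def Pre_count (rows : List (List Int)) : Prop := ∀ row ∈ rows, row ≠ []
instance (rows : List (List Int)) : Decidable (Pre_count rows) := by unfold Pre_count; infer_instance
def pvWitness_count : List (List Int) := [[1, 2], [3, 2]]
def Spec_count (rows : List (List Int)) (out : Bool) : Prop := out = count_alt rows
instance (rows : List (List Int)) (out : Bool) : Decidable (Spec_count rows out) := by unfold Spec_count; infer_instance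

-- ===== CLAIM (what is proved, stated in full; the proofs are below) =====
def Claim_equal_count : Prop := ∀ (rows : List (List Int)), Dom_count rows → Pre_count rows → Spec_count rows (count rows)

-- ===== LEMMAS AND PROOFS =====

-- the accumulator never shrinks
theorem pvStep_len_mono (acc : List Int) (ls : List Int) :
    acc.length ≤ (ls.foldl pvStep acc).length := by
  induction ls generalizing acc with
  | nil => simp
  | cons x xs ih =>
    simp only [List.foldl_cons]
    refine le_trans ?_ (ih (pvStep acc x))
    unfold pvStep; split <;> simp

-- core: starting from the singleton [a], the fold ends with length 1 iff every element equals a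
theorem pvFold_singleton (a : Int) (ls : List Int) :
    ((ls.foldl pvStep [a]).length = 1) ↔ (∀ x ∈ ls, x = a) := by
  induction ls with
  | nil => simp
  | cons x xs ih =>
    simp only [List.foldl_cons, List.mem_cons]
    by_cases hx : x = a
    · subst hx
      have : pvStep [x] x = [x] := by simp [pvStep]
      rw [this]
      constructor
      · intro h y hy
        rcases hy with h1 | h2
        · exact h1
        · exact ih.mp h y h2
      · intro h; exact ih.mpr (fun y hy => h y (Or.inr hy))
    · have : pvStep [a] x = [a, x] := by simp [pvStep, hx]
      rw [this]
      constructor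
      · intro h
        have h2 : 2 ≤ (xs.foldl pvStep [a, x]).length := by
          simpa using pvStep_len_mono [a, x] xs
        omega
      · intro h; exact absurd (h x (Or.inl rfl)) hx

theorem count_eq_alt (rows : List (List Int)) (hpre : Pre_count rows) :
    count rows = count_alt rows := by
  cases rows with
  | nil => simp [count, count_alt]
  | cons r rest =>
    unfold count count_alt
    simp only [List.foldl_cons]
    have h0 : pvStep [] (PySem.List.pyGetD r (-1) 0) = [PySem.List.pyGetD r (-1) 0] := by
      simp [pvStep]
    simp only [h0]
    rw [← List.foldl_map (f := fun row => PySem.List.pyGetD row (-1) 0) (g := pvStep)]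
    rw [Bool.eq_iff_iff]
    simp only [decide_eq_true_eq, List.all_cons, Bool.and_eq_true, List.all_eq_true,
      beq_iff_eq, beq_self_eq_true, true_and, pvFold_singleton]
    constructor
    · intro h row hrow
      exact h _ (List.mem_map_of_mem hrow)
    · intro h x hx
      rcases List.mem_map.mp hx with ⟨row, hrow, rfl⟩
      exact h row hrow

-- ===== VERDICT (by name: the statement is the Claim_ definition above) =====
theorem count_spec : Claim_equal_count := by
  intro rows _ hpre
  exact count_eq_alt rows hpre
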